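-- pv_equiv track=rewrite | github.com/behiquekalani/behique | tools/reel-pipeline/write_story.py | generate_image_prompt
-- ===== SOURCE A (Python) =====
-- def generate_image_prompt(text, scene_idx, total_scenes):
--     """
--     Generate a cinematic image prompt from scene text.
--     Uses keywords and emotional cues to create visual descriptions.
--     """
--     text_lower = text.lower()
--
--     # Detect emotional tone
--     if any(w in text_lower for w in ['cry', 'tear', 'miss', 'gone', 'lost', 'passed']):
--         mood = "deeply emotional, melancholic, cinematic"
--     elif any(w in text_lower for w in ['laugh', 'smile', 'happy', 'joy', 'love']):
--         mood = "warm, joyful, soft golden light, cinematic"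
--     elif any(w in text_lower for w in ['remember', 'used to', 'back when', 'those days']):
--         mood = "nostalgic, warm vintage tones, cinematic"
--     elif any(w in text_lower for w in ['quiet', 'still', 'alone', 'empty', 'silence']):
--         mood = "quiet, contemplative, soft diffused light, cinematic"
--     else:
--         mood = "warm, emotional, cinematic lighting"
--
--     # Detect subjects
--     subjects = []
--     if any(w in text_lower for w in ['mom', 'mother', 'mama']):
--         subjects.append("a mother figure")
--     if any(w in text_lower for w in ['dad', 'father', 'papa', 'papi']):
--         subjects.append("a father figure")
--     if any(w in text_lower for w in ['grandma', 'grandmother', 'abuela']):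
--         subjects.append("an elderly grandmother")
--     if any(w in text_lower for w in ['kid', 'child', 'young', 'little']):
--         subjects.append("a child")
--     if any(w in text_lower for w in ['kitchen', 'cook', 'food', 'recipe']):
--         subjects.append("a warm kitchen setting")
--     if any(w in text_lower for w in ['phone', 'call', 'voicemail', 'text']):
--         subjects.append("a phone close-up")
--     if any(w in text_lower for w in ['house', 'home', 'room', 'door']):
--         subjects.append("a home interior")
--     if any(w in text_lower for w in ['car', 'drive', 'road', 'truck']):
--         subjects.append("a vehicle or road scene")
--     if any(w in text_lower for w in ['school', 'class', 'teacher']):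
--         subjects.append("a school setting")
--
--     # Build prompt
--     subject_str = ", ".join(subjects[:2]) if subjects else "a person in a quiet moment"
--
--     # Camera angle varies by scene position
--     if scene_idx == 0:
--         angle = "establishing wide shot"
--     elif scene_idx == total_scenes - 1:
--         angle = "intimate close-up, shallow depth of field"
--     elif scene_idx % 2 == 0:
--         angle = "medium shot, natural framing"
--     else:
--         angle = "close-up detail shot, macro"
--
--     prompt = f"{subject_str}, {angle}, {mood}, 4k"
--     return prompt
-- ===== SOURCE B (Python) =====
-- # Single left-to-right scan over the text: at each position, test every rule's keywords
-- # as prefixes and record matched categories in a set; mood/subjects are then looked up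
-- # from the hit set by priority order, instead of A's per-keyword substring searches.
--
-- RULES = [
--     (('cry', 'tear', 'miss', 'gone', 'lost', 'passed'), "deeply emotional, melancholic, cinematic"),
--     (('laugh', 'smile', 'happy', 'joy', 'love'), "warm, joyful, soft golden light, cinematic"),
--     (('remember', 'used to', 'back when', 'those days'), "nostalgic, warm vintage tones, cinematic"),
--     (('quiet', 'still', 'alone', 'empty', 'silence'), "quiet, contemplative, soft diffused light, cinematic"),
--     (('mom', 'mother', 'mama'), "a mother figure"),
--     (('dad', 'father', 'papa', 'papi'), "a father figure"),
--     (('grandma', 'grandmother', 'abuela'), "an elderly grandmother"),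
--     (('kid', 'child', 'young', 'little'), "a child"),
--     (('kitchen', 'cook', 'food', 'recipe'), "a warm kitchen setting"),
--     (('phone', 'call', 'voicemail', 'text'), "a phone close-up"),
--     (('house', 'home', 'room', 'door'), "a home interior"),
--     (('car', 'drive', 'road', 'truck'), "a vehicle or road scene"),
--     (('school', 'class', 'teacher'), "a school setting"),
-- ]
--
-- MOOD_PRIORITY = [tag for _, tag in RULES[:4]]
-- DEFAULT_MOOD = "warm, emotional, cinematic lighting"
-- SUBJECT_ORDER = [tag for _, tag in RULES[4:]]
--
--
-- def generate_image_prompt(text, scene_idx, total_scenes):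
--     tl = text.lower()
--
--     hits = set()
--     for i in range(len(tl) + 1):
--         for kws, tag in RULES:
--             if any(tl.startswith(w, i) for w in kws):
--                 hits.add(tag)
--
--     mood = next((m for m in MOOD_PRIORITY if m in hits), DEFAULT_MOOD)
--
--     subjects = [s for s in SUBJECT_ORDER if s in hits]
--     subject_str = ", ".join(subjects[:2]) if subjects else "a person in a quiet moment"
--
--     if scene_idx == 0:
--         angle = "establishing wide shot"
--     elif scene_idx == total_scenes - 1:
--         angle = "intimate close-up, shallow depth of field"
--     elif scene_idx % 2 == 0:
--         angle = "medium shot, natural framing"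
--     else:
--         angle = "close-up detail shot, macro"
--
--     return f"{subject_str}, {angle}, {mood}, 4k"
-- ===== Notes on version B (the rewrite author's own statement) =====
-- stated objective: alternative
-- what changed: Instead of A's per-keyword substring searches driving an if/elif cascade and nine subject ifs, B makes one left-to-right scan of the text, prefix-testing every rule's keywords at each position into a hit set, and then derives the mood (first hit in priority order, else default) and the ordered subject list from that set.
import Mathlib
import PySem

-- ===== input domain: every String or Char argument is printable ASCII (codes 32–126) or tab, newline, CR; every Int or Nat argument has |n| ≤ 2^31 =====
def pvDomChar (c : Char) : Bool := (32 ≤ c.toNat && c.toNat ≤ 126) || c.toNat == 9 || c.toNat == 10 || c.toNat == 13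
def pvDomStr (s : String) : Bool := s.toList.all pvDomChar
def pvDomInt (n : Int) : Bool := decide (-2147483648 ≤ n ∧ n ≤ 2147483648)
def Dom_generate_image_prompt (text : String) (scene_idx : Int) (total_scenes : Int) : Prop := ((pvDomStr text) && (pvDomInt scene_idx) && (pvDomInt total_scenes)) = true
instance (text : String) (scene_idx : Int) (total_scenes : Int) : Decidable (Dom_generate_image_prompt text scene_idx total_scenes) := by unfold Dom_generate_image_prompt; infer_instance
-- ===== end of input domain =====

-- B replaces A's per-keyword substring searches by one left-to-right scan of the text that
-- prefix-tests all keywords at each position into a hit set, then looks moods/subjects up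
-- from that set by priority order (objective: alternative); return values proved equal.

-- ===== PORT A =====
-- literal transliteration of A: the if/elif mood cascade, nine sequential subject appends,
-- subjects[:2] (nonnegative slice = take 2), the angle cascade, and the final f-string.
def generate_image_prompt (text : String) (scene_idx : Int) (total_scenes : Int) : String :=
  let text_lower := PySem.Str.lower text
  let mood :=
    if ["cry", "tear", "miss", "gone", "lost", "passed"].any (fun w => PySem.Str.isIn w text_lower) then
      "deeply emotional, melancholic, cinematic"
    else if ["laugh", "smile", "happy", "joy", "love"].any (fun w => PySem.Str.isIn w text_lower) then
      "warm, joyful, soft golden light, cinematic"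
    else if ["remember", "used to", "back when", "those days"].any (fun w => PySem.Str.isIn w text_lower) then
      "nostalgic, warm vintage tones, cinematic"
    else if ["quiet", "still", "alone", "empty", "silence"].any (fun w => PySem.Str.isIn w text_lower) then
      "quiet, contemplative, soft diffused light, cinematic"
    else
      "warm, emotional, cinematic lighting"
  let subjects : List String := []
  let subjects := if ["mom", "mother", "mama"].any (fun w => PySem.Str.isIn w text_lower) then subjects ++ ["a mother figure"] else subjects
  let subjects := if ["dad", "father", "papa", "papi"].any (fun w => PySem.Str.isIn w text_lower) then subjects ++ ["a father figure"] else subjects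
  let subjects := if ["grandma", "grandmother", "abuela"].any (fun w => PySem.Str.isIn w text_lower) then subjects ++ ["an elderly grandmother"] else subjects
  let subjects := if ["kid", "child", "young", "little"].any (fun w => PySem.Str.isIn w text_lower) then subjects ++ ["a child"] else subjects
  let subjects := if ["kitchen", "cook", "food", "recipe"].any (fun w => PySem.Str.isIn w text_lower) then subjects ++ ["a warm kitchen setting"] else subjects
  let subjects := if ["phone", "call", "voicemail", "text"].any (fun w => PySem.Str.isIn w text_lower) then subjects ++ ["a phone close-up"] else subjects
  let subjects := if ["house", "home", "room", "door"].any (fun w => PySem.Str.isIn w text_lower) then subjects ++ ["a home interior"] else subjects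
  let subjects := if ["car", "drive", "road", "truck"].any (fun w => PySem.Str.isIn w text_lower) then subjects ++ ["a vehicle or road scene"] else subjects
  let subjects := if ["school", "class", "teacher"].any (fun w => PySem.Str.isIn w text_lower) then subjects ++ ["a school setting"] else subjects
  let subject_str := if subjects.isEmpty then "a person in a quiet moment" else PySem.Str.join ", " (subjects.take 2)
  let angle :=
    if scene_idx == 0 then "establishing wide shot"
    else if scene_idx == total_scenes - 1 then "intimate close-up, shallow depth of field"
    else if PySem.Int.mod scene_idx 2 == 0 then "medium shot, natural framing"
    else "close-up detail shot, macro"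
  subject_str ++ ", " ++ angle ++ ", " ++ mood ++ ", 4k"

-- ===== PORT B =====
def pvRules : List (List String × String) :=
  [ (["cry", "tear", "miss", "gone", "lost", "passed"], "deeply emotional, melancholic, cinematic"),
    (["laugh", "smile", "happy", "joy", "love"], "warm, joyful, soft golden light, cinematic"),
    (["remember", "used to", "back when", "those days"], "nostalgic, warm vintage tones, cinematic"),
    (["quiet", "still", "alone", "empty", "silence"], "quiet, contemplative, soft diffused light, cinematic"),
    (["mom", "mother", "mama"], "a mother figure"),
    (["dad", "father", "papa", "papi"], "a father figure"),
    (["grandma", "grandmother", "abuela"], "an elderly grandmother"),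
    (["kid", "child", "young", "little"], "a child"),
    (["kitchen", "cook", "food", "recipe"], "a warm kitchen setting"),
    (["phone", "call", "voicemail", "text"], "a phone close-up"),
    (["house", "home", "room", "door"], "a home interior"),
    (["car", "drive", "road", "truck"], "a vehicle or road scene"),
    (["school", "class", "teacher"], "a school setting") ]

def pvMoodPriority : List String :=
  [ "deeply emotional, melancholic, cinematic",
    "warm, joyful, soft golden light, cinematic",
    "nostalgic, warm vintage tones, cinematic",
    "quiet, contemplative, soft diffused light, cinematic" ]

def pvSubjectOrder : List String :=
  [ "a mother figure", "a father figure", "an elderly grandmother", "a child",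
    "a warm kitchen setting", "a phone close-up", "a home interior",
    "a vehicle or road scene", "a school setting" ]

-- Source B's inner loop at one scan position: tl.startswith(w, i) on the remaining suffix cs
def pvHitsAt (cs : List Char) (h : PySem.Set String) : PySem.Set String :=
  pvRules.foldl
    (fun h r => if r.1.any (fun w => PySem.Chars.startswith cs w.toList) then PySem.Set.add h r.2 else h) h

-- Source B's outer loop 'for i in range(len(tl) + 1)': one step per suffix, including the empty one
def pvScanHits : List Char → PySem.Set String → PySem.Set String
  | [], h => pvHitsAt [] h
  | c :: rest, h => pvScanHits rest (pvHitsAt (c :: rest) h)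

-- Source B's next((m for m in MOOD_PRIORITY if m in hits), DEFAULT_MOOD)
def pvFirstIn : List String → PySem.Set String → String
  | [], _ => "warm, emotional, cinematic lighting"
  | m :: rest, h => if PySem.Set.contains h m then m else pvFirstIn rest h

def generate_image_prompt_alt (text : String) (scene_idx : Int) (total_scenes : Int) : String :=
  let tl := PySem.Str.lower text
  let hits := pvScanHits tl.toList PySem.Set.empty
  let mood := pvFirstIn pvMoodPriority hits
  let subjects := pvSubjectOrder.filter (fun s => PySem.Set.contains hits s)
  let subject_str := if subjects.isEmpty then "a person in a quiet moment" else PySem.Str.join ", " (subjects.take 2)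
  let angle :=
    if scene_idx == 0 then "establishing wide shot"
    else if scene_idx == total_scenes - 1 then "intimate close-up, shallow depth of field"
    else if PySem.Int.mod scene_idx 2 == 0 then "medium shot, natural framing"
    else "close-up detail shot, macro"
  subject_str ++ ", " ++ angle ++ ", " ++ mood ++ ", 4k"

-- ===== PRECONDITION & SPEC =====
def Spec_generate_image_prompt (text : String) (scene_idx : Int) (total_scenes : Int) (out : String) : Prop := out = generate_image_prompt_alt text scene_idx total_scenes
instance (text : String) (scene_idx : Int) (total_scenes : Int) (out : String) : Decidable (Spec_generate_image_prompt text scene_idx total_scenes out) := by unfold Spec_generate_image_prompt; infer_instance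

-- ===== CLAIM =====
def Claim_equal_generate_image_prompt : Prop := ∀ (text : String) (scene_idx : Int) (total_scenes : Int), Dom_generate_image_prompt text scene_idx total_scenes → Spec_generate_image_prompt text scene_idx total_scenes (generate_image_prompt text scene_idx total_scenes)

-- ===== LEMMAS AND PROOFS =====

-- one scan step adds exactly the tags of rules with a keyword starting at this position
theorem pv_mem_hitsAt (rs : List (List String × String)) (cs : List Char)
    (h : PySem.Set String) (x : String) :
    x ∈ rs.foldl (fun h r => if r.1.any (fun w => PySem.Chars.startswith cs w.toList) then PySem.Set.add h r.2 else h) h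
      ↔ x ∈ h ∨ ∃ r ∈ rs, r.2 = x ∧ r.1.any (fun w => PySem.Chars.startswith cs w.toList) = true := by
  induction rs generalizing h with
  | nil => simp
  | cons r rest ih =>
      simp only [List.foldl_cons]
      by_cases hc : r.1.any (fun w => PySem.Chars.startswith cs w.toList) = true
      · rw [if_pos hc, ih]
        simp only [PySem.Set.mem_add, List.mem_cons]
        constructor
        · rintro ((hx | rfl) | ⟨r', hr', hx, hb⟩)
          · exact Or.inl hx
          · exact Or.inr ⟨r, Or.inl rfl, rfl, hc⟩
          · exact Or.inr ⟨r', Or.inr hr', hx, hb⟩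
        · rintro (hx | ⟨r', (rfl | hr'), hx, hb⟩)
          · exact Or.inl (Or.inl hx)
          · exact Or.inl (Or.inr hx.symm)
          · exact Or.inr ⟨r', hr', hx, hb⟩
      · rw [if_neg hc, ih]
        simp only [List.mem_cons]
        constructor
        · rintro (hx | ⟨r', hr', hx, hb⟩)
          · exact Or.inl hx
          · exact Or.inr ⟨r', Or.inr hr', hx, hb⟩
        · rintro (hx | ⟨r', (rfl | hr'), hx, hb⟩)
          · exact Or.inl hx
          · exact absurd hb hc
          · exact Or.inr ⟨r', hr', hx, hb⟩

-- the whole scan collects the tags of rules with a keyword starting at SOME position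
theorem pv_mem_scanHits (cs : List Char) (h : PySem.Set String) (x : String) :
    x ∈ pvScanHits cs h
      ↔ x ∈ h ∨ ∃ r ∈ pvRules, r.2 = x ∧
          ∃ j, r.1.any (fun w => PySem.Chars.startswith (cs.drop j) w.toList) = true := by
  induction cs generalizing h with
  | nil =>
      rw [pvScanHits, pvHitsAt, pv_mem_hitsAt]
      simp only [List.drop_nil]
      constructor
      · rintro (hx | ⟨r, hr, hx, hb⟩)
        · exact Or.inl hx
        · exact Or.inr ⟨r, hr, hx, 0, hb⟩
      · rintro (hx | ⟨r, hr, hx, j, hb⟩)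
        · exact Or.inl hx
        · exact Or.inr ⟨r, hr, hx, hb⟩
  | cons c rest ih =>
      rw [pvScanHits, ih, pvHitsAt, pv_mem_hitsAt]
      constructor
      · rintro ((hx | ⟨r, hr, hx, hb⟩) | ⟨r, hr, hx, j, hb⟩)
        · exact Or.inl hx
        · exact Or.inr ⟨r, hr, hx, 0, hb⟩
        · exact Or.inr ⟨r, hr, hx, j + 1, by simpa using hb⟩
      · rintro (hx | ⟨r, hr, hx, j, hb⟩)
        · exact Or.inl (Or.inl hx)
        · cases j with
          | zero => exact Or.inl (Or.inr ⟨r, hr, hx, hb⟩)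
          | succ j => exact Or.inr ⟨r, hr, hx, j, by simpa using hb⟩

-- 'keyword starts at some position' is exactly 'keyword in text'
theorem pv_exists_drop_any (g : List String) (cs : List Char) :
    (∃ j, g.any (fun w => PySem.Chars.startswith (cs.drop j) w.toList) = true)
      ↔ g.any (fun w => PySem.Chars.isIn w.toList cs) = true := by
  simp only [List.any_eq_true]
  constructor
  · rintro ⟨j, w, hw, hb⟩
    exact ⟨w, hw, (PySem.Chars.exists_prefix_drop_iff_isIn _ _).1
      ⟨j, (PySem.Chars.startswith_iff _ _).1 hb⟩⟩
  · rintro ⟨w, hw, hb⟩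
    obtain ⟨j, hj⟩ := (PySem.Chars.exists_prefix_drop_iff_isIn _ _).2 hb
    exact ⟨j, w, hw, (PySem.Chars.startswith_iff _ _).2 hj⟩

-- the hit set answers exactly A's per-rule 'any keyword in text' test
theorem pv_contains_scan (tl : String) (g : List String) (t : String)
    (hg : (g, t) ∈ pvRules) (huniq : ∀ r ∈ pvRules, r.2 = t → r = (g, t)) :
    PySem.Set.contains (pvScanHits tl.toList PySem.Set.empty) t
      = g.any (fun w => PySem.Str.isIn w tl) := by
  rw [Bool.eq_iff_iff, PySem.Set.contains_iff, pv_mem_scanHits]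
  simp only [PySem.Set.empty, List.not_mem_nil, false_or, pv_exists_drop_any]
  constructor
  · rintro ⟨r, hr, hx, hb⟩
    have := huniq r hr hx
    subst this
    simpa [PySem.Str.isIn_eq] using hb
  · intro hb
    exact ⟨(g, t), hg, rfl, by simpa [PySem.Str.isIn_eq] using hb⟩

theorem pv_mood_eq (tl : String) :
    pvFirstIn pvMoodPriority (pvScanHits tl.toList PySem.Set.empty)
      = (if ["cry", "tear", "miss", "gone", "lost", "passed"].any (fun w => PySem.Str.isIn w tl) then
          "deeply emotional, melancholic, cinematic"
        else if ["laugh", "smile", "happy", "joy", "love"].any (fun w => PySem.Str.isIn w tl) then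
          "warm, joyful, soft golden light, cinematic"
        else if ["remember", "used to", "back when", "those days"].any (fun w => PySem.Str.isIn w tl) then
          "nostalgic, warm vintage tones, cinematic"
        else if ["quiet", "still", "alone", "empty", "silence"].any (fun w => PySem.Str.isIn w tl) then
          "quiet, contemplative, soft diffused light, cinematic"
        else
          "warm, emotional, cinematic lighting") := by
  simp only [pvMoodPriority, pvFirstIn,
    pv_contains_scan tl ["cry", "tear", "miss", "gone", "lost", "passed"] "deeply emotional, melancholic, cinematic" (by decide) (by decide),
    pv_contains_scan tl ["laugh", "smile", "happy", "joy", "love"] "warm, joyful, soft golden light, cinematic" (by decide) (by decide),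
    pv_contains_scan tl ["remember", "used to", "back when", "those days"] "nostalgic, warm vintage tones, cinematic" (by decide) (by decide),
    pv_contains_scan tl ["quiet", "still", "alone", "empty", "silence"] "quiet, contemplative, soft diffused light, cinematic" (by decide) (by decide)]

theorem pv_filter_cons_append (p : String → Bool) (x : String) (xs : List String) :
    List.filter p (x :: xs) = (if p x = true then [x] else []) ++ List.filter p xs := by
  by_cases h : p x = true <;> simp [h]

-- proof-only: the subject rules and a cons-style collector for them
def pvSubjRules : List (List String × String) :=
  [ (["mom", "mother", "mama"], "a mother figure"),
    (["dad", "father", "papa", "papi"], "a father figure"),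
    (["grandma", "grandmother", "abuela"], "an elderly grandmother"),
    (["kid", "child", "young", "little"], "a child"),
    (["kitchen", "cook", "food", "recipe"], "a warm kitchen setting"),
    (["phone", "call", "voicemail", "text"], "a phone close-up"),
    (["house", "home", "room", "door"], "a home interior"),
    (["car", "drive", "road", "truck"], "a vehicle or road scene"),
    (["school", "class", "teacher"], "a school setting") ]

def pvCollectS : List (List String × String) → String → List String
  | [], _ => []
  | (kws, label) :: rest, tl =>
      if kws.any (fun w => PySem.Str.isIn w tl) then label :: pvCollectS rest tl
      else pvCollectS rest tl

-- proof-only: A-style accumulator formulation of the subject chain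
def pvChainS (rules : List (List String × String)) (tl : String) (acc : List String) : List String :=
  match rules with
  | [] => acc
  | (kws, label) :: rest =>
      pvChainS rest tl (if kws.any (fun w => PySem.Str.isIn w tl) then acc ++ [label] else acc)

theorem pvChainS_eq (rules : List (List String × String)) (tl : String) (acc : List String) :
    pvChainS rules tl acc = acc ++ pvCollectS rules tl := by
  induction rules generalizing acc with
  | nil => simp [pvChainS, pvCollectS]
  | cons r rest ih =>
      obtain ⟨kws, label⟩ := r
      simp only [pvChainS, pvCollectS]
      split_ifs <;> simp [ih]

-- B's filter over the hit set answers exactly the cons-style collection over the rules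
theorem pv_filter_eq_collect (tl : String) :
    pvSubjectOrder.filter (fun s => PySem.Set.contains (pvScanHits tl.toList PySem.Set.empty) s)
      = pvCollectS pvSubjRules tl := by
  have hcons : ∀ (b : Bool) (x : String) (r : List String),
      ((if b = true then [x] else []) ++ r) = (if b = true then x :: r else r) := by
    intro b x r; cases b <;> simp
  simp only [pvSubjectOrder, pv_filter_cons_append, List.filter_nil,
    pv_contains_scan tl ["mom", "mother", "mama"] "a mother figure" (by decide) (by decide),
    pv_contains_scan tl ["dad", "father", "papa", "papi"] "a father figure" (by decide) (by decide),
    pv_contains_scan tl ["grandma", "grandmother", "abuela"] "an elderly grandmother" (by decide) (by decide),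
    pv_contains_scan tl ["kid", "child", "young", "little"] "a child" (by decide) (by decide),
    pv_contains_scan tl ["kitchen", "cook", "food", "recipe"] "a warm kitchen setting" (by decide) (by decide),
    pv_contains_scan tl ["phone", "call", "voicemail", "text"] "a phone close-up" (by decide) (by decide),
    pv_contains_scan tl ["house", "home", "room", "door"] "a home interior" (by decide) (by decide),
    pv_contains_scan tl ["car", "drive", "road", "truck"] "a vehicle or road scene" (by decide) (by decide),
    pv_contains_scan tl ["school", "class", "teacher"] "a school setting" (by decide) (by decide),
    hcons, pvCollectS, pvSubjRules]

-- and that collection is A's nine-fold append chain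
theorem pv_subjects_eq (tl : String) :
    pvSubjectOrder.filter (fun s => PySem.Set.contains (pvScanHits tl.toList PySem.Set.empty) s)
      = (let subjects : List String := []
         let subjects := if ["mom", "mother", "mama"].any (fun w => PySem.Str.isIn w tl) then subjects ++ ["a mother figure"] else subjects
         let subjects := if ["dad", "father", "papa", "papi"].any (fun w => PySem.Str.isIn w tl) then subjects ++ ["a father figure"] else subjects
         let subjects := if ["grandma", "grandmother", "abuela"].any (fun w => PySem.Str.isIn w tl) then subjects ++ ["an elderly grandmother"] else subjects
         let subjects := if ["kid", "child", "young", "little"].any (fun w => PySem.Str.isIn w tl) then subjects ++ ["a child"] else subjects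
         let subjects := if ["kitchen", "cook", "food", "recipe"].any (fun w => PySem.Str.isIn w tl) then subjects ++ ["a warm kitchen setting"] else subjects
         let subjects := if ["phone", "call", "voicemail", "text"].any (fun w => PySem.Str.isIn w tl) then subjects ++ ["a phone close-up"] else subjects
         let subjects := if ["house", "home", "room", "door"].any (fun w => PySem.Str.isIn w tl) then subjects ++ ["a home interior"] else subjects
         let subjects := if ["car", "drive", "road", "truck"].any (fun w => PySem.Str.isIn w tl) then subjects ++ ["a vehicle or road scene"] else subjects
         if ["school", "class", "teacher"].any (fun w => PySem.Str.isIn w tl) then subjects ++ ["a school setting"] else subjects) := by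
  rw [pv_filter_eq_collect, ← List.nil_append (pvCollectS pvSubjRules tl), ← pvChainS_eq]
  simp only [pvChainS, pvSubjRules]

-- ===== VERDICT =====
theorem generate_image_prompt_spec : Claim_equal_generate_image_prompt := by
  intro text scene_idx total_scenes _
  unfold Spec_generate_image_prompt
  simp only [generate_image_prompt, generate_image_prompt_alt, pv_mood_eq, pv_subjects_eq]
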